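-- pv_equiv track=rewrite | github.com/ravi-kumar7/Power-Programmer | Recursion/Minimum Unique Number/code_python.py | count_unique
-- ===== SOURCE A (Python) =====
-- from collections import defaultdict
--
-- def count_unique(k,array_elements):
--     dictionary = defaultdict(int)
--     for i in array_elements:
--         dictionary[i]+=1
--     sorted_list = [[key,dictionary[key]] for key in sorted(dictionary ,key=dictionary.get,reverse=False)]
--     for i in range(k):
--         sorted_list[0][1]-=1
--         if sorted_list[0][1]==0:
--             sorted_list.pop(0)
--     return len(sorted_list)
-- ===== SOURCE B (Python) =====
-- from collections import Counter
--
-- def count_unique(k, array_elements):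
--     # One pass over frequency-sorted buckets: subtract whole bucket counts from k.
--     counts = Counter(array_elements)
--     removed = 0
--     for c in sorted(counts.values()):
--         if c <= k:
--             k -= c
--             removed += 1
--         else:
--             break
--     return len(counts) - removed
-- ===== Notes on version B (the rewrite author's own statement) =====
-- stated objective: faster
-- what changed: A removes k elements one at a time, decrementing the head bucket of the frequency-sorted list k times; B makes a single pass over the ascending-sorted frequencies, subtracting whole bucket counts from k and counting fully removed buckets.
import Mathlib
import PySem

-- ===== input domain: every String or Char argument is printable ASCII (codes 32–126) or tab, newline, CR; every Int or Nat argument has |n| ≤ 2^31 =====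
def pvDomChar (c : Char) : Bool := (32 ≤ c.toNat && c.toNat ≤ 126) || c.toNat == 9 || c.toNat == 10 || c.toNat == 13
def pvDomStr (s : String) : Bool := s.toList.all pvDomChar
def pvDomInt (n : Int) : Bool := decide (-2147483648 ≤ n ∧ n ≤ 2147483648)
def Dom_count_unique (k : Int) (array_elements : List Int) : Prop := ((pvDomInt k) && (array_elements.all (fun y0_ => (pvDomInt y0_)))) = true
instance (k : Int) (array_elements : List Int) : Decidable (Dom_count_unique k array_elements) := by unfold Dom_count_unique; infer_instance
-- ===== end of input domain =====

-- B replaces A's k single-decrement iterations over the sorted buckets by one pass over the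
-- ascending-sorted frequencies, subtracting whole bucket counts from k (objective: faster).

-- ===== PORT A =====
-- one iteration of A's `for i in range(k)` body: sorted_list[0][1] -= 1; pop the head if it hits 0
-- (on the empty list Python raises IndexError — those inputs are excluded by Pre_; here it is a no-op)
def pvAStep (sl : List (Int × Int)) : List (Int × Int) :=
  match sl with
  | [] => []
  | (key, c) :: rest => if c - 1 = 0 then rest else (key, c - 1) :: rest

def count_unique (k : Int) (array_elements : List Int) : Int :=
  let dictionary := array_elements.foldl (fun d i => d.modify i 0 (· + 1)) PySem.Dict.empty
  let sorted_list :=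
    (PySem.List.sorted dictionary.keys (fun key => dictionary.getD key 0) false).map
      (fun key => (key, dictionary.getD key 0))
  let final := (PySem.List.pyRange 0 k 1).foldl (fun sl _ => pvAStep sl) sorted_list
  (final.length : Int)

-- ===== PORT B =====
-- the `for c in sorted(...)` loop with its early break, carrying (k, removed)
def pvBLoop : Int → Int → List Int → Int
  | _, removed, [] => removed
  | k, removed, c :: rest => if c ≤ k then pvBLoop (k - c) (removed + 1) rest else removed

def count_unique_alt (k : Int) (array_elements : List Int) : Int :=
  let counts := PySem.Dict.counter array_elements
  let removed := pvBLoop k 0 (PySem.List.sorted counts.values (fun x => x) false)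
  (counts.size : Int) - removed

-- ===== PRECONDITION & SPEC =====
-- Pre_ excludes exactly the inputs with k > len(array_elements), on which A raises IndexError
-- (it indexes sorted_list[0] after every element has been removed).
def Pre_count_unique (k : Int) (array_elements : List Int) : Prop :=
  k ≤ (array_elements.length : Int)
instance (k : Int) (array_elements : List Int) : Decidable (Pre_count_unique k array_elements) := by
  unfold Pre_count_unique; infer_instance

def pvWitness_count_unique : Int × List Int := (2, [1, 2, 2])

def Spec_count_unique (k : Int) (array_elements : List Int) (out : Int) : Prop := out = count_unique_alt k array_elements
instance (k : Int) (array_elements : List Int) (out : Int) : Decidable (Spec_count_unique k array_elements out) := by unfold Spec_count_unique; infer_instance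

-- ===== CLAIM (what is proved, stated in full; the proofs are below) =====
def Claim_equal_count_unique : Prop := ∀ (k : Int) (array_elements : List Int), Dom_count_unique k array_elements → Pre_count_unique k array_elements → Spec_count_unique k array_elements (count_unique k array_elements)

-- ===== LEMMAS AND PROOFS =====

-- mapping the key through a stable insertion commutes with insertion by the identity key
theorem pv_map_insertBy {α : Type} (f : α → Int) (x : α) (acc : List α) :
    (PySem.List.insertBy (fun a b => decide (f a < f b)) x acc).map f
      = PySem.List.insertBy (fun a b => decide (a < b)) (f x) (acc.map f) := by
  induction acc with
  | nil => simp [PySem.List.insertBy]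
  | cons y ys ih =>
      by_cases h : f x < f y
      · simp [PySem.List.insertBy, h]
      · simp [PySem.List.insertBy, h, ih]

theorem pv_map_foldl_insertBy {α : Type} (f : α → Int) (l : List α) (acc : List α) :
    (l.foldl (fun acc x => PySem.List.insertBy (fun a b => decide (f a < f b)) x acc) acc).map f
      = (l.map f).foldl (fun acc x => PySem.List.insertBy (fun a b => decide (a < b)) x acc) (acc.map f) := by
  induction l generalizing acc with
  | nil => simp
  | cons x xs ih => simp [ih, pv_map_insertBy]

-- map f (sorted l by f) = sorted (map f l)  — stable sort commutes with the key map
theorem pv_map_sorted {α : Type} (f : α → Int) (l : List α) :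
    (PySem.List.sorted l f false).map f = PySem.List.sorted (l.map f) (fun x => x) false := by
  rw [PySem.List.sorted_eq_foldl_insertBy, PySem.List.sorted_eq_foldl_insertBy]
  simpa using pv_map_foldl_insertBy f l []

-- folding A's loop body over range(k) is iterating it k.toNat times
theorem pv_foldl_const_step {β : Type} (g : List (Int × Int) → List (Int × Int))
    (l : List β) (init : List (Int × Int)) :
    l.foldl (fun sl _ => g sl) init = g^[l.length] init := by
  induction l generalizing init with
  | nil => rfl
  | cons a t ih => simp [List.foldl_cons, ih, Function.iterate_succ_apply]

theorem pv_step_decrement (n : Nat) : ∀ (a c : Int) (rest : List (Int × Int)),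
    (n : Int) < c → pvAStep^[n] ((a, c) :: rest) = (a, c - n) :: rest := by
  induction n with
  | zero => intro a c rest _; simp
  | succ m ih =>
      intro a c rest h
      rw [Function.iterate_succ_apply]
      have h1 : ¬ (c - 1 = 0) := by omega
      have h2 : (m : Int) < c - 1 := by push_cast at h ⊢; omega
      simp only [pvAStep, if_neg h1]
      rw [ih a (c - 1) rest h2]
      congr 1
      push_cast
      ring_nf

theorem pv_step_consume (m : Nat) : ∀ (a : Int) (rest : List (Int × Int)),
    0 < m → pvAStep^[m] ((a, (m : Int)) :: rest) = rest := by
  induction m with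
  | zero => intro _ _ h; omega
  | succ p ih =>
      intro a rest _
      rw [Function.iterate_succ_apply]
      by_cases hp : p = 0
      · subst hp; simp [pvAStep]
      · have h1 : ¬ ((p : Int) + 1 - 1 = 0) := by omega
        simp only [pvAStep, Nat.cast_add, Nat.cast_one, if_neg h1]
        have : ((p : Int) + 1 - 1) = (p : Int) := by ring
        rw [this]
        exact ih a rest (Nat.pos_of_ne_zero hp)

theorem pv_bloop_shift (l : List Int) : ∀ (k r : Int), pvBLoop k r l = r + pvBLoop k 0 l := by
  induction l with
  | nil => intro k r; simp [pvBLoop]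
  | cons c rest ih =>
      intro k r
      by_cases h : c ≤ k
      · simp only [pvBLoop, if_pos h]
        rw [ih (k - c) (r + 1), ih (k - c) (0 + 1)]
        ring
      · simp [pvBLoop, if_neg h]

-- core: iterating A's one-at-a-time removal k.toNat times removes exactly the buckets
-- B's whole-bucket pass removes
theorem pv_core (ps : List (Int × Int)) (hpos : ∀ p ∈ ps, 0 < p.2) : ∀ (k : Int),
    ((pvAStep^[k.toNat] ps).length : Int)
      = (ps.length : Int) - pvBLoop k 0 (ps.map Prod.snd) := by
  induction ps with
  | nil =>
      intro k
      rw [Function.iterate_fixed rfl]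
      simp [pvBLoop]
  | cons p rest ih =>
      intro k
      obtain ⟨a, c⟩ := p
      have hc : 0 < c := hpos (a, c) List.mem_cons_self
      have hrest : ∀ q ∈ rest, 0 < q.2 := fun q hq => hpos q (List.mem_cons_of_mem _ hq)
      by_cases hck : c ≤ k
      · have hsplit : k.toNat = (k - c).toNat + c.toNat := by omega
        rw [hsplit, Function.iterate_add_apply]
        have hcons : pvAStep^[c.toNat] ((a, c) :: rest) = rest := by
          have hcast : ((c.toNat : Int)) = c := by omega
          have := pv_step_consume c.toNat a rest (by omega)
          rwa [hcast] at this
        rw [hcons]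
        have := ih hrest (k - c)
        simp only [List.map_cons, pvBLoop, if_pos hck, List.length_cons]
        rw [pv_bloop_shift]
        push_cast
        omega
      · have hlt : (k.toNat : Int) < c := by omega
        rw [pv_step_decrement k.toNat a c rest hlt]
        simp [pvBLoop, if_neg hck]

-- positivity of the counts in A's sorted_list
theorem pv_counts_pos (ae : List Int) (key : Int)
    (hk : key ∈ (PySem.Dict.counter ae).keys) :
    0 < (PySem.Dict.counter ae).getD key 0 := by
  rw [PySem.Dict.keys_counter] at hk
  have hmem : key ∈ ae := (PySem.Set.mem_ofList ae key).mp hk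
  rw [PySem.Dict.getD_counter]
  exact_mod_cast List.count_pos_iff.mpr hmem

-- ===== VERDICT (by name: the statement is the Claim_ definition above) =====
theorem count_unique_spec : Claim_equal_count_unique := by
  intro k ae _hdom _hpre
  show ((((PySem.List.pyRange 0 k 1).foldl (fun sl _ => pvAStep sl)
      ((PySem.List.sorted (PySem.Dict.counter ae).keys
          (fun key => (PySem.Dict.counter ae).getD key 0) false).map
        (fun key => (key, (PySem.Dict.counter ae).getD key 0)))).length : Int)
    = ((PySem.Dict.counter ae).size : Int)
        - pvBLoop k 0 (PySem.List.sorted (PySem.Dict.counter ae).values (fun x => x) false))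
  set d := PySem.Dict.counter ae with hddef
  set f : Int → Int := fun key => d.getD key 0 with hf
  set sorted_list := (PySem.List.sorted d.keys f false).map (fun key => (key, f key)) with hsl
  have hnd : d.keys.Nodup := PySem.Dict.nodup_keys_counter ae
  -- the counts list seen by A equals the sorted values list seen by B
  have hsnd : sorted_list.map Prod.snd = PySem.List.sorted d.values (fun x => x) false := by
    rw [hsl, List.map_map]
    have h1 : (Prod.snd ∘ fun key => (key, f key)) = f := rfl
    rw [h1, pv_map_sorted f d.keys, ← PySem.Dict.values_eq_map_keys d hnd 0]
  -- all counts positive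
  have hpos : ∀ p ∈ sorted_list, 0 < p.2 := by
    intro p hp
    rw [hsl] at hp
    obtain ⟨key, hkey, rfl⟩ := List.mem_map.mp hp
    have hk : key ∈ d.keys := (PySem.List.mem_sorted _ _ _ _).mp hkey
    exact pv_counts_pos ae key hk
  -- lengths
  have hlen : (sorted_list.length : Int) = (d.size : Int) := by
    rw [hsl]
    simp [PySem.List.length_sorted, PySem.Dict.keys, PySem.Dict.size]
  -- turn the range(k) fold into an iterate
  rw [pv_foldl_const_step, PySem.List.length_pyRange_one]
  have h0 : (k - 0).toNat = k.toNat := by omega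
  rw [h0, pv_core sorted_list hpos k, hsnd, hlen]
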